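-- pv_equiv track=rewrite | github.com/grammy-jiang/research-pipeline | src/research_pipeline/screening/query_cleanup.py | deduplicate_substrings
-- ===== SOURCE A (Python) =====
-- def deduplicate_substrings(terms: list[str]) -> list[str]:
--     """Remove terms that are substrings of other terms in the list.
--
--     If "neural" and "neural network" are both present, "neural" is
--     redundant because "neural network" is more specific.
--
--     Args:
--         terms: List of query terms (may contain multi-word phrases).
--
--     Returns:
--         Deduplicated list, preferring longer (more specific) terms.
--     """
--     if len(terms) <= 1:
--         return terms
--
--     # Sort by length descending so longer terms are checked first
--     sorted_terms = sorted(terms, key=len, reverse=True)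
--     result: list[str] = []
--
--     for term in sorted_terms:
--         lower_term = term.lower()
--         # Check if this term is a substring of any already-kept term
--         is_substring = any(
--             lower_term in kept.lower() and lower_term != kept.lower() for kept in result
--         )
--         if not is_substring:
--             result.append(term)
--
--     # Restore original ordering
--     original_order = {t.lower(): i for i, t in enumerate(terms)}
--     result.sort(key=lambda t: original_order.get(t.lower(), len(terms)))
--     return result
-- ===== SOURCE B (Python) =====
-- def deduplicate_substrings(terms: list[str]) -> list[str]:
--     """Remove terms whose lowercase is a proper substring of another term's lowercase."""
--     if len(terms) <= 1:
--         return terms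
--     lowers = [t.lower() for t in terms]
--     last = {lo: i for i, lo in enumerate(lowers)}
--     kept = [t for t, lo in zip(terms, lowers)
--             if not any(lo in s and lo != s for s in lowers)]
--     kept.sort(key=lambda t: last[t.lower()])
--     return kept
-- ===== Notes on version B (the rewrite author's own statement) =====
-- stated objective: simpler
-- what changed: B drops A's length-descending sort and incrementally grown kept-list entirely: a term is kept iff its lowercase is a proper substring of no term's lowercase (a single global filter over the precomputed lowercase list), then one stable sort by the lowercase's dictionary index restores the order.
import Mathlib
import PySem

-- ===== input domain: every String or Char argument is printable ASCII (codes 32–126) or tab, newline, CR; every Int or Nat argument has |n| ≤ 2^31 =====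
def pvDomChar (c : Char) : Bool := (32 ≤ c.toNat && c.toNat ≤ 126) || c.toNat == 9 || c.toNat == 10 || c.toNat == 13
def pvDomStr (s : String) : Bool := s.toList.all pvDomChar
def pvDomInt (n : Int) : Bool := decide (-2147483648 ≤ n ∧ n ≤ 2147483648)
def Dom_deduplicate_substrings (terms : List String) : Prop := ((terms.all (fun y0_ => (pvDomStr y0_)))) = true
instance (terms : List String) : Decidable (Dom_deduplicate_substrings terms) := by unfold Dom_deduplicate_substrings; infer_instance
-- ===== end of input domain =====

-- B replaces A's length-descending sort + incrementally grown kept-list by a single global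
-- filter (a term is dropped iff its lowercase is a proper substring of ANY term's lowercase),
-- followed by one stable sort by the lowercase's dictionary index (objective: simpler).

-- ===== PORT A =====
def deduplicate_substrings (terms : List String) : List String :=
  if terms.length ≤ 1 then terms
  else
    let sorted_terms := PySem.List.sorted terms (fun t => PySem.Str.len t) true
    let result := sorted_terms.foldl (fun result term =>
      let lower_term := PySem.Str.lower term
      let is_substring := result.any (fun kept =>
        PySem.Str.isIn lower_term (PySem.Str.lower kept) && lower_term != PySem.Str.lower kept)
      if !is_substring then result ++ [term] else result) []
    let original_order := (PySem.List.enumerate terms 0).foldl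
      (fun d p => d.insert (PySem.Str.lower p.2) p.1) (PySem.Dict.empty : PySem.Dict String Int)
    PySem.List.sorted result
      (fun t => original_order.getD (PySem.Str.lower t) (PySem.List.len terms)) false

-- ===== PORT B =====
-- 'last[t.lower()]' can never raise KeyError (every kept t has t.lower() in last, a fact
-- proved below); '(get? …).getD 0' is its total form, the default branch is unreachable.
def deduplicate_substrings_alt (terms : List String) : List String :=
  if terms.length ≤ 1 then terms
  else
    let lowers := terms.map PySem.Str.lower
    let last := (PySem.List.enumerate lowers 0).foldl
      (fun d p => d.insert p.2 p.1) (PySem.Dict.empty : PySem.Dict String Int)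
    let kept := ((terms.zip lowers).filter (fun p =>
      !(lowers.any (fun s => PySem.Str.isIn p.2 s && p.2 != s)))).map (fun p => p.1)
    PySem.List.sorted kept (fun t => ((last.get? (PySem.Str.lower t)).getD 0 : Int)) false

-- ===== PRECONDITION & SPEC =====
def Spec_deduplicate_substrings (terms : List String) (out : List String) : Prop := out = deduplicate_substrings_alt terms
instance (terms : List String) (out : List String) : Decidable (Spec_deduplicate_substrings terms out) := by unfold Spec_deduplicate_substrings; infer_instance

-- ===== CLAIM (what is proved, stated in full; the proofs are below) =====
def Claim_equal_deduplicate_substrings : Prop := ∀ (terms : List String), Dom_deduplicate_substrings terms → Spec_deduplicate_substrings terms (deduplicate_substrings terms)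

-- ===== LEMMAS AND PROOFS =====

-- proper-superstring relation: lower t is a strict substring of lower s
def Psup (t s : String) : Prop :=
  (PySem.Str.lower t).toList <:+: (PySem.Str.lower s).toList ∧ PySem.Str.lower t ≠ PySem.Str.lower s

-- B's keep-test as a predicate on a term
def qB (terms : List String) (t : String) : Bool :=
  !((terms.map PySem.Str.lower).any (fun s =>
      PySem.Str.isIn (PySem.Str.lower t) s && PySem.Str.lower t != s))

theorem lower_length (s : String) : (PySem.Str.lower s).toList.length = s.toList.length := by
  simp [PySem.Chars.lower]

theorem psup_length {t s : String} (h : Psup t s) :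
    (PySem.Str.lower t).toList.length < (PySem.Str.lower s).toList.length := by
  rcases h with ⟨hinf, hne⟩
  rcases Nat.lt_or_ge (PySem.Str.lower t).toList.length (PySem.Str.lower s).toList.length with h | h
  · exact h
  · exact absurd (String.toList_inj.mp (hinf.eq_of_length (Nat.le_antisymm hinf.length_le h)))
      hne

theorem psup_trans {a b c : String} (h1 : Psup a b) (h2 : Psup b c) : Psup a c := by
  refine ⟨h1.1.trans h2.1, fun he => ?_⟩
  have ha := psup_length h1
  have hb := psup_length h2
  rw [he] at ha
  omega

theorem qB_eq_false_iff (terms : List String) (t : String) :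
    qB terms t = false ↔ ∃ s ∈ terms, Psup t s := by
  simp [qB, Psup, PySem.Chars.isIn_iff_infix, bne_iff_ne]

theorem qB_eq_true_iff (terms : List String) (t : String) :
    qB terms t = true ↔ ∀ s ∈ terms, ¬ Psup t s := by
  simp [qB, Psup, PySem.Chars.isIn_iff_infix, bne_iff_ne, not_and]

theorem chk_iff (t k : String) :
    (PySem.Str.isIn (PySem.Str.lower t) (PySem.Str.lower k) &&
      PySem.Str.lower t != PySem.Str.lower k) = true ↔ Psup t k := by
  simp [Psup, PySem.Chars.isIn_iff_infix, bne_iff_ne]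

-- every term with a proper superstring in the list has one that B keeps
theorem exists_kept_sup (terms : List String) (t : String)
    (h : ∃ s ∈ terms, Psup t s) :
    ∃ s ∈ terms, qB terms s = true ∧ Psup t s := by
  rcases h with ⟨s₀, hs₀, hps₀⟩
  have key : ∀ (k : Nat) (u : String), u ∈ terms → Psup t u →
      (terms.foldl (fun acc y => max acc y.toList.length) 0) - u.toList.length ≤ k →
      ∃ s ∈ terms, qB terms s = true ∧ Psup t s := by
    intro k
    induction k with
    | zero =>
        intro u hu hp hle
        by_cases hq : qB terms u = true
        · exact ⟨u, hu, hq, hp⟩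
        · rcases (qB_eq_false_iff terms u).mp (by simpa using hq) with ⟨z, hz, hpz⟩
          have h1 := psup_length hpz
          rw [lower_length, lower_length] at h1
          have h2 : z.toList.length ≤ terms.foldl (fun acc y => max acc y.toList.length) 0 :=
            (PySem.List.le_foldl_max_nat terms (fun y => y.toList.length) 0).2 z hz
          omega
    | succ k ih =>
        intro u hu hp hle
        by_cases hq : qB terms u = true
        · exact ⟨u, hu, hq, hp⟩
        · rcases (qB_eq_false_iff terms u).mp (by simpa using hq) with ⟨z, hz, hpz⟩
          have h1 := psup_length hpz
          rw [lower_length, lower_length] at h1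
          exact ih z hz (psup_trans hp hpz) (by omega)
  have hle : (terms.foldl (fun acc y => max acc y.toList.length) 0) - s₀.toList.length ≤
      terms.foldl (fun acc y => max acc y.toList.length) 0 := Nat.sub_le _ _
  exact key _ s₀ hs₀ hps₀ hle

-- ---- insertion-sort facts ----

theorem insertBy_nil {α : Type} (bef : α → α → Bool) (x : α) :
    PySem.List.insertBy bef x [] = [x] := rfl

theorem insertBy_cons {α : Type} (bef : α → α → Bool) (x y : α) (ys : List α) :
    PySem.List.insertBy bef x (y :: ys) =
      if bef x y then x :: y :: ys else y :: PySem.List.insertBy bef x ys := rfl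

theorem insertBy_filter_neg {α : Type} (bef : α → α → Bool) (p : α → Bool) (x : α)
    (acc : List α) (hx : p x = false) :
    (PySem.List.insertBy bef x acc).filter p = acc.filter p := by
  induction acc with
  | nil => simp [insertBy_nil, hx]
  | cons y ys ih =>
      rw [insertBy_cons]
      by_cases hb : bef x y = true
      · simp [hb, hx]
      · simp only [Bool.not_eq_true] at hb
        simp [hb, List.filter_cons, ih]

theorem insertBy_filter_pos {α : Type} (bef : α → α → Bool) (p : α → Bool) (x : α)
    (acc : List α) (hx : p x = true)
    (hall : ∀ y ∈ acc, p y = true → bef x y = false)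
    (hmono : acc.Pairwise (fun a b => bef x a = true → bef x b = true)) :
    (PySem.List.insertBy bef x acc).filter p = acc.filter p ++ [x] := by
  induction acc with
  | nil => simp [insertBy_nil, hx]
  | cons y ys ih =>
      rw [insertBy_cons]
      rcases List.pairwise_cons.mp hmono with ⟨hy, hys⟩
      by_cases hb : bef x y = true
      · have hfy : (y :: ys).filter p = [] := by
          rw [List.filter_eq_nil_iff]
          intro z hz
          rcases List.mem_cons.mp hz with hz | hz
          · subst hz
            intro hpz
            exact absurd (hall z (List.mem_cons_self ..) (by simpa using hpz)) (by simp [hb])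
          · intro hpz
            exact absurd (hall z (List.mem_cons_of_mem _ hz) (by simpa using hpz))
              (by simp [hy z hz hb])
        rw [if_pos hb, List.filter_cons_of_pos (by simp [hx]), hfy]
        simp
      · simp only [Bool.not_eq_true] at hb
        rw [if_neg (by simp [hb])]
        simp only [List.filter_cons]
        rw [ih (fun z hz hp => hall z (List.mem_cons_of_mem _ hz) hp) hys]
        by_cases hp : p y = true <;> simp [hp]

theorem sorted_concat_false {α κ : Type} [LinearOrder κ] (xs : List α) (x : α) (key : α → κ) :
    PySem.List.sorted (xs ++ [x]) key false =
      PySem.List.insertBy (fun a b => decide (key a < key b)) x (PySem.List.sorted xs key false) := by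
  rw [PySem.List.sorted_eq_foldl_insertBy, PySem.List.sorted_eq_foldl_insertBy, List.foldl_append]
  rfl

theorem sorted_concat_true {α κ : Type} [LinearOrder κ] (xs : List α) (x : α) (key : α → κ) :
    PySem.List.sorted (xs ++ [x]) key true =
      PySem.List.insertBy (fun a b => decide (key b < key a)) x (PySem.List.sorted xs key true) := by
  rw [PySem.List.sorted_rev_eq_foldl_insertBy, PySem.List.sorted_rev_eq_foldl_insertBy,
    List.foldl_append]
  rfl

-- stability of PySem's sort: a filter whose elements all share one key value is preserved
theorem filter_sorted_false {α : Type} (key : α → Int) (p : α → Bool) (xs : List α)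
    (hp : ∀ x ∈ xs, ∀ y ∈ xs, p x = true → p y = true → key x = key y) :
    (PySem.List.sorted xs key false).filter p = xs.filter p := by
  induction xs using List.reverseRecOn with
  | nil => rfl
  | append_singleton xs x ih =>
      have hp' : ∀ a ∈ xs, ∀ b ∈ xs, p a = true → p b = true → key a = key b :=
        fun a ha b hb => hp a (List.mem_append_left _ ha) b (List.mem_append_left _ hb)
      rw [sorted_concat_false, List.filter_append]
      by_cases hx : p x = true
      · rw [insertBy_filter_pos _ p x _ hx ?hall ?hmono, ih hp']
        · simp [hx]
        case hall =>
          intro y hy hpy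
          have hk := hp x (List.mem_append_right _ (List.mem_singleton_self x)) y
            (List.mem_append_left _ ((PySem.List.mem_sorted _ _ _ _).mp hy)) hx hpy
          simp [hk]
        case hmono =>
          exact (PySem.List.sorted_pairwise xs key).imp
            (fun hab h => by
              simp only [decide_eq_true_eq] at *
              exact lt_of_lt_of_le h hab)
      · simp only [Bool.not_eq_true] at hx
        rw [insertBy_filter_neg _ p x _ hx, ih hp']
        simp [hx]

theorem filter_sorted_true {α : Type} (key : α → Int) (p : α → Bool) (xs : List α)
    (hp : ∀ x ∈ xs, ∀ y ∈ xs, p x = true → p y = true → key x = key y) :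
    (PySem.List.sorted xs key true).filter p = xs.filter p := by
  induction xs using List.reverseRecOn with
  | nil => rfl
  | append_singleton xs x ih =>
      have hp' : ∀ a ∈ xs, ∀ b ∈ xs, p a = true → p b = true → key a = key b :=
        fun a ha b hb => hp a (List.mem_append_left _ ha) b (List.mem_append_left _ hb)
      rw [sorted_concat_true, List.filter_append]
      by_cases hx : p x = true
      · rw [insertBy_filter_pos _ p x _ hx ?hall ?hmono, ih hp']
        · simp [hx]
        case hall =>
          intro y hy hpy
          have hk := hp x (List.mem_append_right _ (List.mem_singleton_self x)) y
            (List.mem_append_left _ ((PySem.List.mem_sorted _ _ _ _).mp hy)) hx hpy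
          simp [hk]
        case hmono =>
          exact (PySem.List.sorted_pairwise_rev xs key).imp
            (fun hab h => by
              simp only [decide_eq_true_eq] at *
              exact lt_of_le_of_lt hab h)
      · simp only [Bool.not_eq_true] at hx
        rw [insertBy_filter_neg _ p x _ hx, ih hp']
        simp [hx]

theorem insertBy_congr {α : Type} (bef₁ bef₂ : α → α → Bool) (x : α) (acc : List α)
    (h : ∀ y ∈ acc, bef₁ x y = bef₂ x y) :
    PySem.List.insertBy bef₁ x acc = PySem.List.insertBy bef₂ x acc := by
  induction acc with
  | nil => rfl
  | cons y ys ih =>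
      rw [insertBy_cons, insertBy_cons, h y (List.mem_cons_self ..)]
      by_cases hb : bef₂ x y = true
      · simp [hb]
      · simp only [Bool.not_eq_true] at hb
        simp [hb, ih (fun z hz => h z (List.mem_cons_of_mem _ hz))]

theorem sorted_key_congr {α : Type} (key₁ key₂ : α → Int) (xs : List α)
    (h : ∀ x ∈ xs, key₁ x = key₂ x) :
    PySem.List.sorted xs key₁ false = PySem.List.sorted xs key₂ false := by
  induction xs using List.reverseRecOn with
  | nil => rfl
  | append_singleton xs x ih =>
      rw [sorted_concat_false, sorted_concat_false,
        ih (fun z hz => h z (List.mem_append_left _ hz))]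
      apply insertBy_congr
      intro y hy
      rw [h x (List.mem_append_right _ (List.mem_singleton_self x)),
        h y (List.mem_append_left _ ((PySem.List.mem_sorted _ _ _ _).mp hy))]

-- two key-sorted lists with equal per-key filters are equal
theorem eq_of_pairwise_filter_eq {α : Type} (key : α → Int) :
    ∀ (xs ys : List α), xs.Pairwise (fun a b => key a ≤ key b) →
      ys.Pairwise (fun a b => key a ≤ key b) →
      (∀ k : Int, xs.filter (fun x => decide (key x = k)) = ys.filter (fun x => decide (key x = k))) →
      xs = ys := by
  intro xs
  induction xs with
  | nil =>
      intro ys _ _ h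
      cases ys with
      | nil => rfl
      | cons y ys =>
          have h1 := h (key y)
          rw [List.filter_nil, List.filter_cons_of_pos (by simp)] at h1
          exact absurd h1.symm (List.cons_ne_nil _ _)
  | cons x xs ih =>
      intro ys hx hy h
      cases ys with
      | nil =>
          have h1 := h (key x)
          rw [List.filter_nil, List.filter_cons_of_pos (by simp)] at h1
          exact absurd h1 (List.cons_ne_nil _ _)
      | cons y ys =>
          rcases List.pairwise_cons.mp hx with ⟨hx1, hx2⟩
          rcases List.pairwise_cons.mp hy with ⟨hy1, hy2⟩
          have hkey : key x = key y := by
            by_contra hne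
            have h1 := h (key x)
            rw [List.filter_cons_of_pos (by simp),
              List.filter_cons_of_neg (by simpa using fun he => hne he.symm)] at h1
            have hxmem : x ∈ ys.filter (fun z => decide (key z = key x)) :=
              h1 ▸ List.mem_cons_self ..
            have hyx : key y ≤ key x := hy1 x (List.mem_filter.mp hxmem).1
            have h2 := h (key y)
            rw [List.filter_cons_of_neg (by simpa using hne),
              List.filter_cons_of_pos (by simp)] at h2
            have hymem : y ∈ xs.filter (fun z => decide (key z = key y)) :=
              h2.symm ▸ List.mem_cons_self ..
            have hxy : key x ≤ key y := hx1 y (List.mem_filter.mp hymem).1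
            exact hne (le_antisymm hxy hyx)
          have h1 := h (key x)
          rw [List.filter_cons_of_pos (by simp),
            List.filter_cons_of_pos (by simp [hkey])] at h1
          have hxy : x = y := (List.cons_eq_cons.mp h1).1
          have htail := (List.cons_eq_cons.mp h1).2
          have hfilters : ∀ k : Int, xs.filter (fun z => decide (key z = k)) =
              ys.filter (fun z => decide (key z = k)) := by
            intro k
            by_cases hk : k = key x
            · subst hk; exact htail
            · have h2 := h k
              rw [List.filter_cons_of_neg (by simpa using fun he => hk he.symm),
                List.filter_cons_of_neg (by simpa using fun he => hk (he.symm.trans hkey.symm))] at h2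
              exact h2
          rw [hxy, ih ys hx2 hy2 hfilters]

-- ---- the dictionary of lowercase → index ----

theorem get?_foldl_enum_not_mem (xs : List String) :
    ∀ (s : Int) (d0 : PySem.Dict String Int) (lo : String), lo ∉ xs →
      ((PySem.List.enumerate xs s).foldl (fun d p => d.insert p.2 p.1) d0).get? lo = d0.get? lo := by
  induction xs with
  | nil => intro s d0 lo _; rfl
  | cons x xs ih =>
      intro s d0 lo h
      rw [PySem.List.enumerate_cons, List.foldl_cons]
      rw [ih (s+1) _ lo (fun hm => h (List.mem_cons_of_mem _ hm))]
      exact PySem.Dict.get?_insert_of_ne _ _ (fun he => h (he ▸ List.mem_cons_self ..))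

theorem get?_foldl_enum_mem (xs : List String) :
    ∀ (s : Int) (d0 : PySem.Dict String Int) (lo : String), lo ∈ xs →
      ∃ i : Nat, i < xs.length ∧
        ((PySem.List.enumerate xs s).foldl (fun d p => d.insert p.2 p.1) d0).get? lo = some (s + i) ∧
        xs[i]? = some lo := by
  induction xs with
  | nil => intro _ _ _ h; simp at h
  | cons x xs ih =>
      intro s d0 lo h
      rw [PySem.List.enumerate_cons, List.foldl_cons]
      by_cases hm : lo ∈ xs
      · rcases ih (s+1) (d0.insert x s) lo hm with ⟨i, hi, hg, hx⟩
        exact ⟨i+1, by simpa using hi, by rw [hg]; congr 1; omega, by simpa using hx⟩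
      · have hlo : lo = x := by
          rcases List.mem_cons.mp h with h' | h'
          · exact h'
          · exact absurd h' hm
        refine ⟨0, by simp, ?_, by simp [hlo]⟩
        rw [get?_foldl_enum_not_mem xs (s+1) _ lo hm, hlo]
        simp [PySem.Dict.get?_insert_self]

theorem foldl_enum_map {α β : Type} [BEq β] (f : α → β) (xs : List α) :
    ∀ (s : Int) (d0 : PySem.Dict β Int),
      (PySem.List.enumerate (xs.map f) s).foldl (fun d p => d.insert p.2 p.1) d0 =
      (PySem.List.enumerate xs s).foldl (fun d p => d.insert (f p.2) p.1) d0 := by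
  induction xs with
  | nil => intro s d0; rfl
  | cons x xs ih =>
      intro s d0
      rw [List.map_cons, PySem.List.enumerate_cons, PySem.List.enumerate_cons,
        List.foldl_cons, List.foldl_cons, ih]

-- ---- the zip/filter/map comprehension of B ----

theorem zip_map_filter_fst {α β : Type} (f : α → β) (g : β → Bool) (xs : List α) :
    (((xs.zip (xs.map f)).filter (fun p => g p.2)).map (fun p => p.1)) =
      xs.filter (fun x => g (f x)) := by
  induction xs with
  | nil => rfl
  | cons x xs ih =>
      simp only [List.map_cons, List.zip_cons_cons, List.filter_cons]
      by_cases hg : g (f x) = true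
      · simp [hg, ih]
      · simp only [Bool.not_eq_true] at hg
        simp [hg, ih]

-- ---- A's fold computes the global filter ----

theorem crux (terms : List String) (S₁ S₂ : List String) (t : String)
    (hS : ∀ x, x ∈ S₁ ++ t :: S₂ ↔ x ∈ terms)
    (hpw : (S₁ ++ t :: S₂).Pairwise (fun a b => PySem.Str.len b ≤ PySem.Str.len a)) :
    ((S₁.filter (qB terms)).any (fun kept =>
        PySem.Str.isIn (PySem.Str.lower t) (PySem.Str.lower kept) &&
        PySem.Str.lower t != PySem.Str.lower kept)) = !(qB terms t) := by
  by_cases hq : qB terms t = true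
  · rw [hq, Bool.not_true, List.any_eq_false]
    intro kept hk
    have hkt : kept ∈ terms := (hS kept).mp (List.mem_append_left _ (List.mem_of_mem_filter hk))
    have hnp := (qB_eq_true_iff terms t).mp hq kept hkt
    intro hch
    exact hnp ((chk_iff t kept).mp hch)
  · simp only [Bool.not_eq_true] at hq
    rw [hq, Bool.not_false, List.any_eq_true]
    rcases exists_kept_sup terms t ((qB_eq_false_iff terms t).mp hq) with ⟨s, hsmem, hqs, hps⟩
    have hsS : s ∈ S₁ ++ t :: S₂ := (hS s).mpr hsmem
    rcases List.mem_append.mp hsS with h1 | h2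
    · exact ⟨s, List.mem_filter.mpr ⟨h1, hqs⟩, (chk_iff t s).mpr hps⟩
    · exfalso
      rcases List.mem_cons.mp h2 with he | hmem
      · exact hps.2 (by rw [he])
      · have hpw2 := (List.pairwise_append.mp hpw).2.1
        have hts := (List.pairwise_cons.mp hpw2).1 s hmem
        have hlen := psup_length hps
        rw [lower_length, lower_length] at hlen
        rw [PySem.Str.len_eq, PySem.Str.len_eq] at hts
        omega

theorem foldA (terms S : List String)
    (hS : ∀ x, x ∈ S ↔ x ∈ terms)
    (hpw : S.Pairwise (fun a b => PySem.Str.len b ≤ PySem.Str.len a)) :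
    ∀ (S₂ S₁ : List String), S₁ ++ S₂ = S →
      S₂.foldl (fun result term =>
        let lower_term := PySem.Str.lower term
        let is_substring := result.any (fun kept =>
          PySem.Str.isIn lower_term (PySem.Str.lower kept) && lower_term != PySem.Str.lower kept)
        if !is_substring then result ++ [term] else result) (S₁.filter (qB terms)) =
      (S₁ ++ S₂).filter (qB terms) := by
  intro S₂
  induction S₂ with
  | nil => intro S₁ _; simp
  | cons t S₂ ih =>
      intro S₁ heq
      rw [List.foldl_cons]
      have hc := crux terms S₁ S₂ t (fun x => by rw [heq]; exact hS x) (by rw [heq]; exact hpw)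
      have hstep : (let lower_term := PySem.Str.lower t
          let is_substring := (S₁.filter (qB terms)).any (fun kept =>
            PySem.Str.isIn lower_term (PySem.Str.lower kept) && lower_term != PySem.Str.lower kept)
          if !is_substring then S₁.filter (qB terms) ++ [t] else S₁.filter (qB terms))
          = (S₁ ++ [t]).filter (qB terms) := by
        show (if !((S₁.filter (qB terms)).any (fun kept =>
            PySem.Str.isIn (PySem.Str.lower t) (PySem.Str.lower kept) &&
            PySem.Str.lower t != PySem.Str.lower kept))
          then S₁.filter (qB terms) ++ [t] else S₁.filter (qB terms)) = (S₁ ++ [t]).filter (qB terms)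
        rw [hc, List.filter_append]
        by_cases hqt : qB terms t = true
        · simp [hqt]
        · simp only [Bool.not_eq_true] at hqt
          simp [hqt]
      rw [hstep, ih (S₁ ++ [t]) (by simpa using heq)]
      simp

-- ===== VERDICT (by name: the statement is the Claim_ definition above) =====
theorem deduplicate_substrings_spec : Claim_equal_deduplicate_substrings := by
  intro terms _
  show deduplicate_substrings terms = deduplicate_substrings_alt terms
  rw [deduplicate_substrings, deduplicate_substrings_alt]
  by_cases hlen : terms.length ≤ 1
  · rw [if_pos hlen, if_pos hlen]
  · rw [if_neg hlen, if_neg hlen]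
    show PySem.List.sorted
        ((PySem.List.sorted terms (fun t => PySem.Str.len t) true).foldl
          (fun result term =>
            let lower_term := PySem.Str.lower term
            let is_substring := result.any (fun kept =>
              PySem.Str.isIn lower_term (PySem.Str.lower kept) &&
              lower_term != PySem.Str.lower kept)
            if !is_substring then result ++ [term] else result) [])
        (fun t => ((PySem.List.enumerate terms 0).foldl
            (fun d p => d.insert (PySem.Str.lower p.2) p.1)
            (PySem.Dict.empty : PySem.Dict String Int)).getD
          (PySem.Str.lower t) (PySem.List.len terms)) false
      = PySem.List.sorted
        (((terms.zip (terms.map PySem.Str.lower)).filter (fun p =>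
            !((terms.map PySem.Str.lower).any (fun s =>
              PySem.Str.isIn p.2 s && p.2 != s)))).map (fun p => p.1))
        (fun t => (((PySem.List.enumerate (terms.map PySem.Str.lower) 0).foldl
            (fun d p => d.insert p.2 p.1)
            (PySem.Dict.empty : PySem.Dict String Int)).get? (PySem.Str.lower t)).getD 0) false
    have hkept : ((terms.zip (terms.map PySem.Str.lower)).filter (fun p =>
        !((terms.map PySem.Str.lower).any (fun s =>
          PySem.Str.isIn p.2 s && p.2 != s)))).map (fun p => p.1)
        = terms.filter (qB terms) :=
      zip_map_filter_fst PySem.Str.lower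
        (fun lo => !((terms.map PySem.Str.lower).any (fun s =>
          PySem.Str.isIn lo s && lo != s))) terms
    have hfold : (PySem.List.sorted terms (fun t => PySem.Str.len t) true).foldl
        (fun result term =>
          let lower_term := PySem.Str.lower term
          let is_substring := result.any (fun kept =>
            PySem.Str.isIn lower_term (PySem.Str.lower kept) &&
            lower_term != PySem.Str.lower kept)
          if !is_substring then result ++ [term] else result) []
        = (PySem.List.sorted terms (fun t => PySem.Str.len t) true).filter (qB terms) :=
      foldA terms (PySem.List.sorted terms (fun t => PySem.Str.len t) true)
        (fun x => PySem.List.mem_sorted _ _ _ _)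
        (PySem.List.sorted_pairwise_rev terms (fun t => PySem.Str.len t))
        (PySem.List.sorted terms (fun t => PySem.Str.len t) true) [] rfl
    rw [hkept, hfold, foldl_enum_map PySem.Str.lower terms 0 PySem.Dict.empty]
    set d := (PySem.List.enumerate terms 0).foldl
      (fun d p => d.insert (PySem.Str.lower p.2) p.1)
      (PySem.Dict.empty : PySem.Dict String Int) with hd
    have hget : ∀ t ∈ terms, ∃ i : Nat, d.get? (PySem.Str.lower t) = some (i : Int) ∧
        (terms.map PySem.Str.lower)[i]? = some (PySem.Str.lower t) := by
      intro t ht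
      rw [hd, ← foldl_enum_map PySem.Str.lower terms 0 PySem.Dict.empty]
      rcases get?_foldl_enum_mem (terms.map PySem.Str.lower) 0 PySem.Dict.empty
        (PySem.Str.lower t) (List.mem_map_of_mem ht) with ⟨i, _, hg, hx⟩
      exact ⟨i, by rw [hg]; norm_num, hx⟩
    have hkeyeq : ∀ y ∈ terms.filter (qB terms),
        (d.get? (PySem.Str.lower y)).getD 0
          = d.getD (PySem.Str.lower y) (PySem.List.len terms) := by
      intro y hy
      rcases hget y (List.mem_of_mem_filter hy) with ⟨i, hg, _⟩
      rw [PySem.Dict.getD_eq_get?_getD, hg]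
      rfl
    rw [sorted_key_congr (fun t => (d.get? (PySem.Str.lower t)).getD 0)
      (fun t => d.getD (PySem.Str.lower t) (PySem.List.len terms))
      (terms.filter (qB terms)) hkeyeq]
    apply eq_of_pairwise_filter_eq (fun t => d.getD (PySem.Str.lower t) (PySem.List.len terms))
      _ _ (PySem.List.sorted_pairwise _ _) (PySem.List.sorted_pairwise _ _)
    intro k
    rw [filter_sorted_false _ _ _
        (fun x _ y _ hpx hpy => (of_decide_eq_true hpx).trans (of_decide_eq_true hpy).symm),
      filter_sorted_false _ _ _
        (fun x _ y _ hpx hpy => (of_decide_eq_true hpx).trans (of_decide_eq_true hpy).symm),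
      List.filter_filter, List.filter_filter]
    apply filter_sorted_true (fun t => PySem.Str.len t) _ terms
    intro x hx y hy hpx hpy
    rcases Bool.and_eq_true_iff.mp hpx with ⟨hkx, _⟩
    rcases Bool.and_eq_true_iff.mp hpy with ⟨hky, _⟩
    rcases hget x hx with ⟨ix, hgx, hlx⟩
    rcases hget y hy with ⟨iy, hgy, hly⟩
    have hkxv : d.getD (PySem.Str.lower x) (PySem.List.len terms) = (ix : Int) := by
      rw [PySem.Dict.getD_eq_get?_getD, hgx]; rfl
    have hkyv : d.getD (PySem.Str.lower y) (PySem.List.len terms) = (iy : Int) := by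
      rw [PySem.Dict.getD_eq_get?_getD, hgy]; rfl
    have hik : (ix : Int) = (iy : Int) := by
      rw [← hkxv, ← hkyv, of_decide_eq_true hkx, of_decide_eq_true hky]
    have hii : ix = iy := by exact_mod_cast hik
    rw [hii, hly] at hlx
    have hlow : PySem.Str.lower y = PySem.Str.lower x := Option.some.inj hlx
    have h1 := lower_length x
    have h2 := lower_length y
    rw [PySem.Str.len_eq, PySem.Str.len_eq]
    rw [hlow] at h2
    omega
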